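-- pv_equiv track=rewrite | github.com/ducotr/Thesis | keyword_near_duplicates.py | normalize_for_merge
-- ===== SOURCE A (Python) =====
-- def normalize_for_merge(kw: str) -> str:
--     """
--     Normalise a keyword for duplicate detection.
--
--     - lowercase
--     - strip leading/trailing whitespace
--     - replace hyphens/underscores with spaces
--     - collapse multiple spaces
--     """
--     kw = kw.strip().lower()
--     if not kw:
--         return ""
--
--     # unify separators
--     for ch in ["_", "-"]:
--         kw = kw.replace(ch, " ")
--
--     # collapse whitespace
--     kw = " ".join(kw.split())
--     return kw
-- ===== SOURCE B (Python) =====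
-- def normalize_for_merge(kw: str) -> str:
--     """Single-pass normalisation: one scan with a pending-separator flag
--     instead of strip + two replaces + split/join."""
--     out = []
--     pending = False
--     for ch in kw.lower():
--         if ch == "_" or ch == "-" or ch.isspace():
--             pending = bool(out)
--         else:
--             if pending:
--                 out.append(" ")
--                 pending = False
--             out.append(ch)
--     return "".join(out)
-- ===== Notes on version B (the rewrite author's own statement) =====
-- stated objective: alternative
-- what changed: Replaces strip plus two whole-string replace passes plus split/join with a single character-level scan that carries a pending-separator flag and collapses separator runs (underscore, hyphen, whitespace) into one space.
import Mathlib
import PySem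

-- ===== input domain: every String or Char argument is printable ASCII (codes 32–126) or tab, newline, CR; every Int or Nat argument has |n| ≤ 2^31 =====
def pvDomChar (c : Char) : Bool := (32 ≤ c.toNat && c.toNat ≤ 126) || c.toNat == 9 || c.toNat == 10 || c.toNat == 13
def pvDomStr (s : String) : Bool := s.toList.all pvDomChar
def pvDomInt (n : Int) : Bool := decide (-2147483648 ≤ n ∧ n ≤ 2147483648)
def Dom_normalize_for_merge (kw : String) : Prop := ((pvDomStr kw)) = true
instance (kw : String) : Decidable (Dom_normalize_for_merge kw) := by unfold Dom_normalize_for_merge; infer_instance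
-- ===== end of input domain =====

-- B replaces A's strip + two whole-string replace passes + split/join with a single
-- character-level scan carrying a pending-separator flag (objective: alternative single-pass decomposition).

-- ===== PORT A =====
def normalize_for_merge (kw : String) : String :=
  -- kw = kw.strip().lower()
  let kw1 := PySem.Str.lower (PySem.Str.strip kw)
  -- if not kw: return ""
  if kw1 = "" then ""
  else
    -- for ch in ["_", "-"]: kw = kw.replace(ch, " ")
    let kw2 := ["_", "-"].foldl (fun s ch => PySem.Str.replace s ch " ") kw1
    -- " ".join(kw.split())
    PySem.Str.join " " (PySem.Str.split₀ kw2)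

-- ===== PORT B =====
def normalize_for_merge_alt (kw : String) : String :=
  -- out = []; pending = False; for ch in kw.lower(): …
  let r := (PySem.Str.lower kw).toList.foldl
    (fun (st : List Char × Bool) ch =>
      if ch == '_' || ch == '-' || PySem.Chars.isspace ch then
        (st.1, !st.1.isEmpty)                                    -- pending = bool(out)
      else
        ((if st.2 then st.1 ++ [' '] else st.1) ++ [ch], false)) -- flush pending space, append ch
    ([], false)
  -- "".join(out)
  String.ofList r.1

-- ===== PRECONDITION & SPEC =====
def Spec_normalize_for_merge (kw : String) (out : String) : Prop := out = normalize_for_merge_alt kw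
instance (kw : String) (out : String) : Decidable (Spec_normalize_for_merge kw out) := by unfold Spec_normalize_for_merge; infer_instance

-- ===== CLAIM (what is proved, stated in full; the proofs are below) =====
def Claim_equal_normalize_for_merge : Prop := ∀ (kw : String), Dom_normalize_for_merge kw → Spec_normalize_for_merge kw (normalize_for_merge kw)

-- ===== LEMMAS AND PROOFS =====

def pvSep (c : Char) : Bool := c == '_' || c == '-' || PySem.Chars.isspace c

def pvSub (c : Char) : Char := if c == '_' || c == '-' then ' ' else c

def pvG : List Char → Bool → List Char
  | [], _ => []
  | c :: t, p => if pvSep c then pvG t true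
                 else (if p then [' '] else []) ++ c :: pvG t false

def pvH : List Char → List Char
  | [] => []
  | c :: t => if pvSep c then pvH t else c :: pvG t false

theorem pvIsspace_lower (c : Char) : PySem.Chars.isspace (PySem.Chars.lowerChar c) = PySem.Chars.isspace c := by
  unfold PySem.Chars.lowerChar
  by_cases h : PySem.Chars.isupper c = true
  · rw [if_pos h]
    unfold PySem.Chars.isupper at h
    simp only [Bool.and_eq_true, decide_eq_true_eq, Char.le_def, UInt32.le_iff_toNat_le] at h
    obtain ⟨h65, h90⟩ := h
    change (65 : Nat) ≤ c.toNat at h65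
    change c.toNat ≤ (90 : Nat) at h90
    have hvalid : Nat.isValidChar (c.toNat + 32) := by left; omega
    have hv : (Char.ofNat (c.toNat + 32)).toNat = c.toNat + 32 := by
      simp [Char.ofNat, hvalid]
    unfold PySem.Chars.isspace
    rw [Bool.eq_iff_iff]
    simp only [hv, Bool.or_eq_true, Bool.and_eq_true, decide_eq_true_eq]
    omega
  · simp [h]

theorem pvIsspace_sub (c : Char) : PySem.Chars.isspace (pvSub c) = pvSep c := by
  unfold pvSub pvSep
  by_cases h1 : c = '_'
  · subst h1; decide
  by_cases h2 : c = '-'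
  · subst h2; decide
  · simp [h1, h2]

theorem pvSub_of_nonsep (c : Char) (h : pvSep c = false) : pvSub c = c := by
  have h1 : (c == '_') = false := by unfold pvSep at h; cases hx : (c == '_') <;> simp [hx] at h ⊢
  have h2 : (c == '-') = false := by unfold pvSep at h; cases hx : (c == '-') <;> simp [hx] at h ⊢
  unfold pvSub; simp [h1, h2]

theorem pvB_step (cs : List Char) :
    ∀ out p, out ≠ [] →
      (cs.foldl (fun (st : List Char × Bool) ch =>
        if ch == '_' || ch == '-' || PySem.Chars.isspace ch then (st.1, !st.1.isEmpty)
        else ((if st.2 then st.1 ++ [' '] else st.1) ++ [ch], false)) (out, p)).1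
      = out ++ pvG cs p := by
  induction cs with
  | nil => intro out p h; simp [pvG]
  | cons c t ih =>
    intro out p h
    simp only [List.foldl_cons]
    by_cases hc : (c == '_' || c == '-' || PySem.Chars.isspace c) = true
    · rw [if_pos hc]
      rw [ih out (!out.isEmpty) h]
      have : (!out.isEmpty) = true := by simp [List.isEmpty_eq_false_iff.mpr h]
      rw [this]
      simp [pvG, show pvSep c = true from by unfold pvSep; exact hc]
    · rw [if_neg hc]
      rw [ih _ false (by simp)]
      have hs : pvSep c = false := by unfold pvSep; simpa using hc
      simp only [pvG, hs, if_neg, Bool.false_eq_true]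
      cases p <;> simp
theorem pvB_init (cs : List Char) :
    (cs.foldl (fun (st : List Char × Bool) ch =>
      if ch == '_' || ch == '-' || PySem.Chars.isspace ch then (st.1, !st.1.isEmpty)
      else ((if st.2 then st.1 ++ [' '] else st.1) ++ [ch], false)) ([], false)).1
    = pvH cs := by
  induction cs with
  | nil => simp [pvH]
  | cons c t ih =>
    simp only [List.foldl_cons]
    by_cases hc : (c == '_' || c == '-' || PySem.Chars.isspace c) = true
    · rw [if_pos hc]; simpa [pvH, show pvSep c = true from by unfold pvSep; exact hc] using ih
    · rw [if_neg hc]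
      rw [pvB_step t _ false (by simp)]
      simp [pvH, show pvSep c = false from by unfold pvSep; simpa using hc]

theorem pvGo_acc (s : List Char) : ∀ cur acc,
    PySem.Chars.split₀.go s cur acc = acc.reverse ++ PySem.Chars.split₀.go s cur [] := by
  induction s with
  | nil =>
    intro cur acc
    by_cases h : cur.isEmpty = true <;> simp [PySem.Chars.split₀.go, h]
  | cons c t ih =>
    intro cur acc
    by_cases hs : PySem.Chars.isspace c = true
    · by_cases h : cur.isEmpty = true
      · simp only [PySem.Chars.split₀.go, hs, h, if_true]
        exact ih [] acc
      · simp only [PySem.Chars.split₀.go, hs, h, if_true, if_false, Bool.false_eq_true]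
        rw [ih [] (cur.reverse :: acc), ih [] [cur.reverse]]
        simp
    · simp only [PySem.Chars.split₀.go, hs, Bool.false_eq_true, if_false]
      exact ih _ acc
theorem pvGo_cur (s : List Char) : ∀ cur, cur ≠ [] →
    PySem.Chars.split₀.go s cur []
      = (cur.reverse ++ s.takeWhile (fun x => !PySem.Chars.isspace x))
        :: PySem.Chars.split₀ (s.dropWhile (fun x => !PySem.Chars.isspace x)) := by
  induction s with
  | nil =>
    intro cur h
    simp [PySem.Chars.split₀.go, PySem.Chars.split₀, List.isEmpty_eq_false_iff.mpr h]
  | cons c t ih =>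
    intro cur h
    by_cases hs : PySem.Chars.isspace c = true
    · simp only [PySem.Chars.split₀.go, hs, if_true, List.isEmpty_eq_false_iff.mpr h,
        Bool.false_eq_true, if_false, List.takeWhile_cons, List.dropWhile_cons, Bool.not_true]
      rw [pvGo_acc]
      simp only [List.reverse_cons, List.reverse_nil, List.nil_append, List.singleton_append]
      unfold PySem.Chars.split₀
      simp [PySem.Chars.split₀.go, hs]
    · simp only [PySem.Chars.split₀.go, hs, Bool.false_eq_true, if_false]
      rw [ih (c :: cur) (by simp)]
      simp [hs]
theorem pvSplit_cons_space (c : Char) (t : List Char) (h : PySem.Chars.isspace c = true) :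
    PySem.Chars.split₀ (c :: t) = PySem.Chars.split₀ t := by
  simp [PySem.Chars.split₀, PySem.Chars.split₀.go, h]
theorem pvSplit_cons_word (c : Char) (t : List Char) (h : PySem.Chars.isspace c = false) :
    PySem.Chars.split₀ (c :: t)
      = (c :: t.takeWhile (fun x => !PySem.Chars.isspace x))
        :: PySem.Chars.split₀ (t.dropWhile (fun x => !PySem.Chars.isspace x)) := by
  unfold PySem.Chars.split₀
  simp only [PySem.Chars.split₀.go, h, Bool.false_eq_true, if_false]
  rw [pvGo_cur t [c] (by simp)]
  simp [PySem.Chars.split₀]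

theorem pvReplaceGo (o : Char) (l : List Char) : ∀ (fuel : Nat) acc, l.length ≤ fuel →
    PySem.Chars.replace.go [o] [' '] fuel l acc
      = acc.reverse ++ l.map (fun c => if c == o then ' ' else c) := by
  induction l with
  | nil => intro fuel acc h; cases fuel <;> simp [PySem.Chars.replace.go]
  | cons c t ih =>
    intro fuel acc h
    cases fuel with
    | zero => simp at h
    | succ n =>
      simp only [PySem.Chars.replace.go]
      by_cases hc : (c == o) = true
      · have hp : [o].isPrefixOf (c :: t) = true := by
          simp only [List.isPrefixOf, List.isPrefixOf_nil_left, Bool.and_true]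
          simp at hc; simp [hc]
        simp only [hp, if_true]
        rw [show List.drop [o].length (c :: t) = t from rfl]
        rw [ih n _ (by simpa using h)]
        have hc' : c = o := by simpa using hc
        simp [hc']
      · have hp : [o].isPrefixOf (c :: t) = false := by
          simp [List.isPrefixOf]
          intro hh; simp [hh] at hc
        rw [if_neg (by simp [hp])]
        rw [ih n (c :: acc) (by simpa using h)]
        have hc' : ¬ c = o := by simpa using hc
        simp [hc']
theorem pvReplace_char (o : Char) (l : List Char) :
    PySem.Chars.replace l [o] [' '] = l.map (fun c => if c == o then ' ' else c) := by
  unfold PySem.Chars.replace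
  rw [if_neg (by simp)]
  rw [pvReplaceGo o l l.length [] le_rfl]
  simp
theorem pvReplace2 (l : List Char) :
    PySem.Chars.replace (PySem.Chars.replace l ['_'] [' ']) ['-'] [' '] = l.map pvSub := by
  rw [pvReplace_char, pvReplace_char, List.map_map]
  apply List.map_congr_left
  intro c _
  simp only [Function.comp]
  unfold pvSub
  by_cases h1 : c = '_'
  · subst h1; decide
  by_cases h2 : c = '-'
  · subst h2; decide
  · simp [h1, h2]
theorem pvJoin_cons (w : List Char) (ws : List (List Char)) :
    PySem.Chars.join [' '] (w :: ws)
      = w ++ (if ws = [] then [] else ' ' :: PySem.Chars.join [' '] ws) := by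
  unfold PySem.Chars.join
  cases ws with
  | nil => simp [List.intercalate]
  | cons w' ws' => simp [List.intercalate, List.flatten, List.intersperse]

theorem pvG_true (t : List Char) : pvG t true = if pvH t = [] then [] else ' ' :: pvH t := by
  induction t with
  | nil => simp [pvG, pvH]
  | cons c r ih =>
    by_cases hc : pvSep c = true
    · simp [pvG, pvH, hc, ih]
    · simp [pvG, pvH, hc]

theorem pvG_allsep (t : List Char) : ∀ p, (∀ c ∈ t, pvSep c = true) → pvG t p = [] := by
  induction t with
  | nil => intro p _; simp [pvG]
  | cons c r ih =>
    intro p h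
    simp [pvG, h c (by simp), ih true (fun x hx => h x (by simp [hx]))]
theorem pvH_allsep (t : List Char) (h : ∀ c ∈ t, pvSep c = true) : pvH t = [] := by
  induction t with
  | nil => simp [pvH]
  | cons c r ih =>
    simp [pvH, h c (by simp), ih (fun x hx => h x (by simp [hx]))]
theorem pvG_append_sep (l : List Char) : ∀ p (l' : List Char), (∀ c ∈ l', pvSep c = true) →
    pvG (l ++ l') p = pvG l p := by
  induction l with
  | nil => intro p l' h; simp [pvG, pvG_allsep l' p h]
  | cons c r ih =>
    intro p l' h
    by_cases hc : pvSep c = true <;> simp [pvG, hc, ih _ l' h]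
theorem pvH_append_sep (l l' : List Char) (h : ∀ c ∈ l', pvSep c = true) :
    pvH (l ++ l') = pvH l := by
  induction l with
  | nil => simp [pvH_allsep l' h, pvH]
  | cons c r ih =>
    by_cases hc : pvSep c = true <;> simp [pvH, hc, ih, pvG_append_sep r false l' h]
theorem pvSep_of_space (c : Char) (h : PySem.Chars.isspace c = true) : pvSep c = true := by
  simp [pvSep, h]
theorem pvH_lstrip (l : List Char) : pvH (l.dropWhile PySem.Chars.isspace) = pvH l := by
  induction l with
  | nil => rfl
  | cons c r ih =>
    by_cases hc : PySem.Chars.isspace c = true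
    · rw [List.dropWhile_cons_of_pos hc, ih]
      simp [pvH, pvSep_of_space c hc]
    · rw [List.dropWhile_cons_of_neg (by simp [hc])]
theorem pvH_strip (l : List Char) : pvH (PySem.Chars.strip l) = pvH l := by
  unfold PySem.Chars.strip PySem.Chars.rstrip PySem.Chars.lstrip
  set m := l.dropWhile PySem.Chars.isspace with hm
  have hsplit : m = (m.reverse.dropWhile PySem.Chars.isspace).reverse
      ++ (m.reverse.takeWhile PySem.Chars.isspace).reverse := by
    rw [← List.reverse_append, List.takeWhile_append_dropWhile, List.reverse_reverse]
  calc pvH (m.reverse.dropWhile PySem.Chars.isspace).reverse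
      = pvH m := by
        conv_rhs => rw [hsplit]
        rw [pvH_append_sep]
        intro c hc
        have : c ∈ m.reverse.takeWhile PySem.Chars.isspace := by simpa using hc
        exact pvSep_of_space c (List.mem_takeWhile_imp this)
    _ = pvH l := pvH_lstrip l
theorem pvLower_strip (l : List Char) :
    PySem.Chars.lower (PySem.Chars.strip l) = PySem.Chars.strip (PySem.Chars.lower l) := by
  unfold PySem.Chars.strip PySem.Chars.rstrip PySem.Chars.lstrip PySem.Chars.lower
  have hcomp : (PySem.Chars.isspace ∘ PySem.Chars.lowerChar) = PySem.Chars.isspace :=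
    funext (fun c => pvIsspace_lower c)
  have hd : ∀ (x : List Char), (x.map PySem.Chars.lowerChar).dropWhile PySem.Chars.isspace
      = (x.dropWhile PySem.Chars.isspace).map PySem.Chars.lowerChar := by
    intro x
    rw [List.dropWhile_map, hcomp]
  simp only [← List.map_reverse, hd]

theorem pvG_false_split (t : List Char) :
    pvG t false = t.takeWhile (fun x => !pvSep x) ++ pvG (t.dropWhile (fun x => !pvSep x)) false := by
  induction t with
  | nil => simp [pvG]
  | cons c r ih =>
    by_cases hc : pvSep c = true
    · simp [List.takeWhile_cons, List.dropWhile_cons, hc]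
    · simp only [List.takeWhile_cons, List.dropWhile_cons, hc, Bool.not_false, Bool.false_eq_true,
        if_false, if_true]
      simp only [pvG, hc, Bool.false_eq_true, if_false]
      simpa using ih
theorem pvG_drop (r : List Char) :
    pvG (r.dropWhile (fun x => !pvSep x)) false
      = if pvH (r.dropWhile (fun x => !pvSep x)) = [] then []
        else ' ' :: pvH (r.dropWhile (fun x => !pvSep x)) := by
  induction r with
  | nil => simp [pvG, pvH]
  | cons d rest ih =>
    by_cases hd : pvSep d = true
    · rw [List.dropWhile_cons_of_neg (by simp [hd])]
      simp only [pvG, pvH, hd, if_true]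
      exact pvG_true rest
    · rw [List.dropWhile_cons_of_pos (by simp [hd])]
      exact ih
theorem pvMapSub_takeWhile (r : List Char) :
    (r.map pvSub).takeWhile (fun x => !PySem.Chars.isspace x) = r.takeWhile (fun x => !pvSep x) := by
  rw [List.takeWhile_map]
  have : ((fun x => !PySem.Chars.isspace x) ∘ pvSub) = (fun x => !pvSep x) := by
    funext c; simp [Function.comp, pvIsspace_sub]
  rw [this]
  conv_rhs => rw [← List.map_id (List.takeWhile (fun x => !pvSep x) r)]
  apply List.map_congr_left
  intro c hc
  exact pvSub_of_nonsep c (by simpa using List.mem_takeWhile_imp hc)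
theorem pvMapSub_dropWhile (r : List Char) :
    (r.map pvSub).dropWhile (fun x => !PySem.Chars.isspace x)
      = (r.dropWhile (fun x => !pvSep x)).map pvSub := by
  rw [List.dropWhile_map]
  have : ((fun x => !PySem.Chars.isspace x) ∘ pvSub) = (fun x => !pvSep x) := by
    funext c; simp [Function.comp, pvIsspace_sub]
  rw [this]
theorem pvMain : ∀ (n : Nat) (t : List Char), t.length ≤ n →
    PySem.Chars.join [' '] (PySem.Chars.split₀ (t.map pvSub)) = pvH t
    ∧ (PySem.Chars.split₀ (t.map pvSub) = [] ↔ pvH t = []) := by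
  intro n
  induction n with
  | zero =>
    intro t h
    have : t = [] := List.length_eq_zero_iff.mp (Nat.le_zero.mp h)
    subst this
    constructor <;> simp [pvH, PySem.Chars.split₀, PySem.Chars.split₀.go, PySem.Chars.join, List.intercalate]
  | succ n ih =>
    intro t h
    cases t with
    | nil =>
      constructor <;> simp [pvH, PySem.Chars.split₀, PySem.Chars.split₀.go, PySem.Chars.join, List.intercalate]
    | cons c r =>
      simp only [List.map_cons]
      by_cases hc : pvSep c = true
      · have hs : PySem.Chars.isspace (pvSub c) = true := by rw [pvIsspace_sub]; exact hc
        rw [pvSplit_cons_space _ _ hs]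
        have := ih r (by simpa using Nat.le_of_succ_le_succ h)
        simp only [pvH, hc, if_true]
        exact this
      · have hs : PySem.Chars.isspace (pvSub c) = false := by rw [pvIsspace_sub]; simpa using hc
        rw [pvSplit_cons_word _ _ hs]
        rw [pvSub_of_nonsep c (by simpa using hc)]
        rw [pvMapSub_takeWhile, pvMapSub_dropWhile]
        have hlen : (r.dropWhile (fun x => !pvSep x)).length ≤ n := by
          calc (r.dropWhile (fun x => !pvSep x)).length ≤ r.length := List.length_dropWhile_le _ _
          _ ≤ n := by simpa using Nat.le_of_succ_le_succ h
        obtain ⟨ihj, ihe⟩ := ih _ hlen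
        constructor
        · rw [pvJoin_cons]
          simp only [pvH, hc, Bool.false_eq_true, if_false]
          rw [pvG_false_split, pvG_drop]
          have hif : (if PySem.Chars.split₀ ((r.dropWhile (fun x => !pvSep x)).map pvSub) = []
              then ([] : List Char)
              else ' ' :: PySem.Chars.join [' '] (PySem.Chars.split₀ ((r.dropWhile (fun x => !pvSep x)).map pvSub)))
              = (if pvH (r.dropWhile (fun x => !pvSep x)) = [] then []
                 else ' ' :: pvH (r.dropWhile (fun x => !pvSep x))) := by
            by_cases hz : PySem.Chars.split₀ ((r.dropWhile (fun x => !pvSep x)).map pvSub) = []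
            · rw [if_pos hz, if_pos (ihe.mp hz)]
            · rw [if_neg hz, if_neg (fun hh => hz (ihe.mpr hh)), ihj]
          rw [hif]
          simp [List.cons_append]
        · constructor <;> intro hh <;> simp [pvH, hc] at hh

theorem pvAlt_eq (kw : String) :
    normalize_for_merge_alt kw = String.ofList (pvH (PySem.Chars.lower kw.toList)) := by
  unfold normalize_for_merge_alt
  dsimp only
  rw [PySem.Str.toList_lower, pvB_init]

theorem pvStripLower_toList (kw : String) :
    (PySem.Str.lower (PySem.Str.strip kw)).toList
      = PySem.Chars.strip (PySem.Chars.lower kw.toList) := by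
  rw [PySem.Str.toList_lower, PySem.Str.toList_strip, pvLower_strip]

-- ===== VERDICT (by name: the statement is the Claim_ definition above) =====
theorem normalize_for_merge_spec : Claim_equal_normalize_for_merge := by
  intro kw _
  unfold Spec_normalize_for_merge normalize_for_merge
  rw [pvAlt_eq]
  by_cases h : PySem.Str.lower (PySem.Str.strip kw) = ""
  · rw [if_pos h]
    have hl : PySem.Chars.strip (PySem.Chars.lower kw.toList) = [] := by
      rw [← pvStripLower_toList, h]
      rfl
    have : pvH (PySem.Chars.lower kw.toList) = [] := by
      rw [← pvH_strip, hl]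
      rfl
    rw [this]
  · rw [if_neg h]
    apply String.toList_inj.mp
    simp only [List.foldl_cons, List.foldl_nil, String.toList_ofList]
    rw [PySem.Str.toList_join, PySem.Str.split₀_map_toList]
    rw [show (" " : String).toList = [' '] from rfl]
    rw [PySem.Str.toList_replace, PySem.Str.toList_replace]
    rw [show ("_" : String).toList = ['_'] from rfl,
        show ("-" : String).toList = ['-'] from rfl,
        show (" " : String).toList = [' '] from rfl]
    rw [pvReplace2, pvStripLower_toList]
    rw [(pvMain (PySem.Chars.strip (PySem.Chars.lower kw.toList)).length _ le_rfl).1]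
    rw [pvH_strip]
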